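-- pv_equiv track=rewrite | github.com/MissaelSanchezVillegas/Concrete-Delivery-Problem | Reduccionsolucion.py | sino2
-- ===== SOURCE A (Python) =====
-- def sino2(lista):                             #me dice si la variable y o h es 1 o no
-- 	count=0
-- 	indice=0
-- 	for x in lista:
-- 		if(x=="."):
-- 			count=count+1
-- 		if(count==2):
-- 			if(lista[indice-1]=="1"):
-- 				return True
-- 			else:
-- 				return False
-- 		indice=indice+1
-- ===== SOURCE B (Python) =====
-- def sino2(lista):
--     parts = lista.split(".")
--     if len(parts) < 3:
--         return None
--     return parts[1].endswith("1")
-- ===== Notes on version B (the rewrite author's own statement) =====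
-- stated objective: idiomatic
-- what changed: Replaces the index-tracking dot-counting character scan by splitting the string on the dot separator: fewer than three parts means no second dot (None); otherwise the character before the second dot is the last character of the middle part, tested with endswith.
import Mathlib
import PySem

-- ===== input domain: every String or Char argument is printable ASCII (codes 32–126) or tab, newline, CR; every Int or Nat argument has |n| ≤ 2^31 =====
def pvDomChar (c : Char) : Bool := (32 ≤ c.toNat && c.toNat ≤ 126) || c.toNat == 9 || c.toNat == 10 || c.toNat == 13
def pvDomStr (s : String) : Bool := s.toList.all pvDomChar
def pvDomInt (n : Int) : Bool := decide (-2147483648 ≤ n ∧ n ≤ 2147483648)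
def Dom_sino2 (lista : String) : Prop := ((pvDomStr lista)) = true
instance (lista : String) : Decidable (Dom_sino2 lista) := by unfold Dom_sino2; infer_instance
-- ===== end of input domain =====

-- B replaces A's index-tracking dot-counting scan by split('.') then inspecting
-- whether parts[1] ends in '1' (more idiomatic; same O(n) cost).


-- ===== PORT A =====
-- the for-loop over lista with the mutable count/indice and the early returns
def sino2Go (lista : String) (rest : List Char) (count indice : Int) : Option Bool :=
  match rest with
  | [] => none                                  -- loop falls through: Python returns None
  | x :: xs =>
    let count := if x == '.' then count + 1 else count
    if count == 2 then
      some (PySem.Str.pyGet? lista (indice - 1) == some '1')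
    else sino2Go lista xs count (indice + 1)

def sino2 (lista : String) : Option Bool := sino2Go lista lista.toList 0 0

-- ===== PORT B =====
-- Source B: parts = lista.split("."); if len(parts) < 3: return None; return parts[1].endswith("1")
def sino2_alt (lista : String) : Option Bool :=
  match PySem.Str.split? lista "." with
  | none => none                               -- unreachable: the separator "." is non-empty
  | some parts =>
    if parts.length < 3 then none
    else
      match PySem.List.pyGet? parts 1 with
      | some p1 => some (PySem.Str.endswith p1 "1")
      | none => none                           -- unreachable: parts has length ≥ 3

-- ===== PRECONDITION & SPEC =====
def Spec_sino2 (lista : String) (out : Option Bool) : Prop := out = sino2_alt lista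
instance (lista : String) (out : Option Bool) : Decidable (Spec_sino2 lista out) := by unfold Spec_sino2; infer_instance

-- ===== CLAIM (what is proved, stated in full; the proofs are below) =====
def Claim_equal_sino2 : Prop := ∀ (lista : String), Dom_sino2 lista → Spec_sino2 lista (sino2 lista)

-- ===== LEMMAS AND PROOFS =====

-- reference split on '.': Python's split(".") on a list of chars
def mySplit : List Char → List (List Char)
  | [] => [[]]
  | c :: rest =>
    if c = '.' then [] :: mySplit rest
    else
      match mySplit rest with
      | [] => [[c]]          -- unreachable
      | p :: ps => (c :: p) :: ps

theorem mySplit_ne_nil (l : List Char) : mySplit l ≠ [] := by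
  cases l with
  | nil => simp [mySplit]
  | cons c rest =>
    simp only [mySplit]
    split_ifs
    · simp
    · cases mySplit rest <;> simp

-- PySem's splitOn with a single-char separator computes mySplit
theorem go_eq (fuel : ℕ) : ∀ (l cur : List Char) (acc : List (List Char)), l.length < fuel →
    PySem.Chars.splitOn.go ['.'] fuel l cur acc =
      acc.reverse ++ (match mySplit l with
        | [] => [cur.reverse]
        | p :: ps => (cur.reverse ++ p) :: ps) := by
  induction fuel with
  | zero => intro l cur acc h; omega
  | succ fuel ih =>
    intro l cur acc h
    cases l with
    | nil => simp [PySem.Chars.splitOn.go, mySplit]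
    | cons c rest =>
      by_cases hc : c = '.'
      · subst hc
        rw [show PySem.Chars.splitOn.go ['.'] (fuel + 1) ('.' :: rest) cur acc
              = PySem.Chars.splitOn.go ['.'] fuel rest [] (cur.reverse :: acc) by
            simp [PySem.Chars.splitOn.go, List.isPrefixOf]]
        rw [ih rest [] (cur.reverse :: acc) (by simpa using h)]
        simp only [mySplit]
        cases hm : mySplit rest with
        | nil => exact absurd hm (mySplit_ne_nil rest)
        | cons p ps => simp
      · rw [show PySem.Chars.splitOn.go ['.'] (fuel + 1) (c :: rest) cur acc
              = PySem.Chars.splitOn.go ['.'] fuel rest (c :: cur) acc by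
            simp [PySem.Chars.splitOn.go, List.isPrefixOf, (by simpa using Ne.symm hc : ¬ '.' = c)]]
        rw [ih rest (c :: cur) acc (by simpa using Nat.lt_of_succ_lt_succ h)]
        simp only [mySplit, if_neg hc]
        cases hm : mySplit rest with
        | nil => exact absurd hm (mySplit_ne_nil rest)
        | cons p ps => simp

theorem splitOn_eq (l : List Char) : PySem.Chars.splitOn l ['.'] = mySplit l := by
  rw [PySem.Chars.splitOn, go_eq (l.length + 1) l [] [] (by omega)]
  cases hm : mySplit l with
  | nil => exact absurd hm (mySplit_ne_nil l)
  | cons p ps => simp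

-- "ends with '1'" as a last-character test
def lastIs1 (l : List Char) : Bool := l.getLast? == some '1'

theorem endswith_eq_lastIs1 (l : List Char) : PySem.Chars.endswith l ['1'] = lastIs1 l := by
  rw [Bool.eq_iff_iff, PySem.Chars.endswith_iff]
  unfold lastIs1
  rw [beq_iff_eq]
  constructor
  · rintro ⟨t, rfl⟩
    simp
  · intro h
    obtain ⟨L, hL⟩ := List.getLast?_eq_some_iff.mp h
    exact ⟨L, hL.symm⟩

theorem lastIs1_dot (l : List Char) : lastIs1 ('.' :: l) = lastIs1 l := by
  cases l <;> simp [lastIs1]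

-- A's scan in state count = 1 (one dot seen): rest is the suffix of lista at index k,
-- prev the char at k - 1; the answer is the last char of (prev :: first part of rest)
theorem sino2Go_one (lista : String) (rest : List Char) : ∀ (k : ℕ) (prev : Char),
    1 ≤ k → lista.toList.drop k = rest → lista.toList[k-1]? = some prev →
    sino2Go lista rest 1 (k : Int) =
      match mySplit rest with
      | [] => none
      | [_] => none
      | q0 :: _ :: _ => some (lastIs1 (prev :: q0)) := by
  induction rest with
  | nil => intro k prev _ _ _; simp [sino2Go, mySplit]
  | cons x xs ih =>
    intro k prev hk hdrop hprev
    by_cases hx : x = '.'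
    · subst hx
      rw [show sino2Go lista ('.' :: xs) 1 (k : Int)
            = some (PySem.Str.pyGet? lista ((k : Int) - 1) == some '1') by simp [sino2Go]]
      rw [show ((k : Int) - 1) = ((k - 1 : ℕ) : Int) by omega]
      rw [show PySem.Str.pyGet? lista ((k - 1 : ℕ) : Int) = lista.toList[k-1]? by
            simp]
      rw [hprev]
      simp only [mySplit]
      cases hm : mySplit xs with
      | nil => exact absurd hm (mySplit_ne_nil xs)
      | cons p ps => simp [lastIs1]
    · rw [show sino2Go lista (x :: xs) 1 (k : Int) = sino2Go lista xs 1 ((k : Int) + 1) by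
            simp [sino2Go, hx]]
      have hdrop' : lista.toList.drop (k + 1) = xs := by
        rw [← List.drop_drop, hdrop]
        simp
      have hx' : lista.toList[k]? = some x := by
        have := congrArg (fun l => l[0]?) hdrop
        simpa [List.getElem?_drop] using this
      rw [show ((k : Int) + 1) = ((k + 1 : ℕ) : Int) by omega]
      rw [ih (k + 1) x (by omega) hdrop' (by simpa using hx')]
      simp only [mySplit, if_neg hx]
      cases hm : mySplit xs with
      | nil => exact absurd hm (mySplit_ne_nil xs)
      | cons p ps =>
        cases ps with
        | nil => simp
        | cons q qs => simp [lastIs1]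

-- A's scan in state count = 0 (no dot seen): the answer is the last char of the
-- part between the first and second dots of the remaining suffix
theorem sino2Go_zero (lista : String) (rest : List Char) : ∀ (k : ℕ),
    lista.toList.drop k = rest →
    sino2Go lista rest 0 (k : Int) =
      match mySplit rest with
      | _ :: q1 :: _ :: _ => some (lastIs1 q1)
      | _ => none := by
  induction rest with
  | nil => intro k _; simp [sino2Go, mySplit]
  | cons x xs ih =>
    intro k hdrop
    have hdrop' : lista.toList.drop (k + 1) = xs := by
      rw [← List.drop_drop, hdrop]
      simp
    have hx' : lista.toList[k]? = some x := by
      have := congrArg (fun l => l[0]?) hdrop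
      simpa [List.getElem?_drop] using this
    by_cases hx : x = '.'
    · subst hx
      rw [show sino2Go lista ('.' :: xs) 0 (k : Int) = sino2Go lista xs 1 ((k : Int) + 1) by
            simp [sino2Go]]
      rw [show ((k : Int) + 1) = ((k + 1 : ℕ) : Int) by omega]
      rw [sino2Go_one lista xs (k + 1) '.' (by omega) hdrop' (by simpa using hx')]
      simp only [mySplit]
      cases hm : mySplit xs with
      | nil => exact absurd hm (mySplit_ne_nil xs)
      | cons p ps =>
        cases ps with
        | nil => simp
        | cons q qs => simp [lastIs1_dot]
    · rw [show sino2Go lista (x :: xs) 0 (k : Int) = sino2Go lista xs 0 ((k : Int) + 1) by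
            simp [sino2Go, hx]]
      rw [show ((k : Int) + 1) = ((k + 1 : ℕ) : Int) by omega]
      rw [ih (k + 1) hdrop']
      simp only [mySplit, if_neg hx]
      cases hm : mySplit xs with
      | nil => exact absurd hm (mySplit_ne_nil xs)
      | cons p ps =>
        cases ps with
        | nil => simp
        | cons q qs => cases qs <;> simp

-- ===== VERDICT (by name: the statement is the Claim_ definition above) =====
theorem sino2_spec : Claim_equal_sino2 := by
  intro lista _
  unfold Spec_sino2 sino2 sino2_alt
  have h0 := sino2Go_zero lista lista.toList 0 (by simp)
  simp only [Nat.cast_zero] at h0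
  rw [h0]
  rw [show PySem.Str.split? lista "." = some ((mySplit lista.toList).map String.ofList) by
        simp [PySem.Str.split?, PySem.Chars.split?, splitOn_eq]]
  cases hm : mySplit lista.toList with
  | nil => exact absurd hm (mySplit_ne_nil lista.toList)
  | cons p ps =>
    cases ps with
    | nil => simp
    | cons q qs =>
      cases qs with
      | nil => simp
      | cons r rs =>
        simp [PySem.List.pyGet?, PySem.List.pyIdx?, endswith_eq_lastIs1,
              show (0:Int) ≤ (rs.length:Int) + 1 from by positivity]
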